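-- pv_equiv track=rewrite | github.com/DeanLJY/Crawler | html2md.py | post_process_html
-- ===== SOURCE A (Python) =====
-- def post_process_html(md_content):
--     lines = md_content.split('\n')
--     new_lines = []
--     for line in lines:
--         # 如果该行全是 * + | 等符号 直接去掉
--         line0 = line.replace('*', '').replace('+', '').replace('|', '').replace('=', '').strip()
--         if len(line0) > 0:
--             line0 = filter_repeat_line(line)
--         # 去掉重复的行
--         if len(line0) > 0 and line0 not in new_lines:
--             new_lines.append(line0)
--     return "\n".join(new_lines)
--
-- def filter_repeat_line(line_text):
--     sub_words = []
--     for word in line_text: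
--         if word not in sub_words:
--             sub_words.append(word)
--     if len(sub_words) > 2 or len(line_text) % len(sub_words) > 0:
--         return line_text
--     sub = ''.join(sub_words)
--     times = len(line_text) / len(sub_words)
--     if times > 3 and sub * int(times) == line_text:
--         return ""
--     return line_text
-- ===== SOURCE B (Python) =====
-- def post_process_html(md_content):
--     seen = set()
--     kept = []
--     drop = str.maketrans('', '', '*+|=')
--     for line in md_content.split('\n'):
--         if not line.translate(drop).strip():
--             continue
--         if _is_char_run(line):
--             continue
--         if line not in seen:
--             seen.add(line)
--             kept.append(line)
--     return "\n".join(kept)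
--
-- def _is_char_run(line):
--     n = len(line)
--     if n > 3 and line == line[0] * n:
--         return True
--     if n > 7 and n % 2 == 0 and line == line[:2] * (n // 2):
--         return True
--     return False
-- ===== Notes on version B (the rewrite author's own statement) =====
-- stated objective: faster
-- what changed: The repeated-line filter is re-derived: instead of accumulating the line's distinct characters and testing divisibility and sub*int(times)==line, B directly tests whether the line is its first 1- or 2-character unit repeated at least 4 times; the order-preserving dedup uses a hash set instead of A's O(k) inner list-membership scan; and the symbol removal is one str.translate pass instead of four .replace passes.
import Mathlib
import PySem

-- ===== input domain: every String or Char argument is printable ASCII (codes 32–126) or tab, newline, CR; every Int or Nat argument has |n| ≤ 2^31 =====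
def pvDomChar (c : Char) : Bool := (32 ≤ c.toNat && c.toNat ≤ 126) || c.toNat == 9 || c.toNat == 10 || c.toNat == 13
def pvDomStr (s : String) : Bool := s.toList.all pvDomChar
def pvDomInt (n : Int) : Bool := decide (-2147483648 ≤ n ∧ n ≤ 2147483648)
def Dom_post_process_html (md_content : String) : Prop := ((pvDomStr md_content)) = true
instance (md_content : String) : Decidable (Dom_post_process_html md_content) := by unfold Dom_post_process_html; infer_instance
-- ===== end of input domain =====

-- B (faster, measured) replaces A's distinct-character accumulation +
-- divisibility test by a direct "repetition of the first 1-or-2-character unit, at least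
-- 4 times" check, and A's inner list-membership dedup scan by a hash-set lookup.

-- ===== PORT A =====
-- sub_words accumulation loop of filter_repeat_line
def pvDedupChars (l : List Char) : List Char :=
  l.foldl (fun acc c => if acc.contains c then acc else acc ++ [c]) []

-- filter_repeat_line.  Python's `times = len/len(sub_words)` is a float, but it is
-- only compared (`times > 3`) and truncated (`int(times)`) after `len % len(sub_words) == 0`
-- held, where both coincide with Nat division; `% 0` / `/ 0` are only reachable on the
-- empty line, where the Lean values 0 make the function return its argument, and the
-- caller never passes an empty line anyway (guarded by `len(line0) > 0`).
def pvFilterRepeatA (line : List Char) : List Char :=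
  let subWords := pvDedupChars line
  if subWords.length > 2 ∨ line.length % subWords.length > 0 then line
  else
    let times := line.length / subWords.length
    if times > 3 ∧ (List.replicate times subWords).flatten = line then [] else line

-- line.replace('*','').replace('+','').replace('|','').replace('=','').strip()
def pvCleanA (l : List Char) : List Char :=
  PySem.Chars.strip
    (PySem.Chars.replace
      (PySem.Chars.replace
        (PySem.Chars.replace
          (PySem.Chars.replace l ['*'] []) ['+'] []) ['|'] []) ['='] [])

-- one iteration of A's `for line in lines` body
def pvLineA (acc : List (List Char)) (line : List Char) : List (List Char) :=
  let line0 := pvCleanA line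
  let line0 := if line0.length > 0 then pvFilterRepeatA line else line0
  if line0.length > 0 ∧ ¬ acc.contains line0 then acc ++ [line0] else acc

def post_process_html (md_content : String) : String :=
  let lines := PySem.Chars.splitOn md_content.toList ['\n']
  let newLines := lines.foldl pvLineA []
  String.ofList (PySem.Chars.join ['\n'] newLines)

-- ===== PORT B =====
-- _is_char_run
def pvIsCharRun (l : List Char) : Bool :=
  (decide (l.length > 3) && l == List.replicate l.length (l.headD ' '))
  || (decide (l.length > 7) && decide (l.length % 2 = 0)
      && l == (List.replicate (l.length / 2) (l.take 2)).flatten)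

-- line.translate(drop).strip()  (translate deleting '*+|=' = keep the other characters)
def pvCleanB (l : List Char) : List Char :=
  PySem.Chars.strip (l.filter (fun c => !(c == '*' || c == '+' || c == '|' || c == '=')))

-- one iteration of B's loop over (seen, kept)
def pvLineB (st : PySem.Set (List Char) × List (List Char)) (line : List Char) :
    PySem.Set (List Char) × List (List Char) :=
  if (pvCleanB line).isEmpty then st
  else if pvIsCharRun line then st
  else if PySem.Set.contains st.1 line then st
  else (PySem.Set.add st.1 line, st.2 ++ [line])

def post_process_html_alt (md_content : String) : String :=
  let st := (PySem.Chars.splitOn md_content.toList ['\n']).foldl pvLineB (PySem.Set.ofList [], [])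
  String.ofList (PySem.Chars.join ['\n'] st.2)

-- ===== PRECONDITION & SPEC =====
def Spec_post_process_html (md_content : String) (out : String) : Prop := out = post_process_html_alt md_content
instance (md_content : String) (out : String) : Decidable (Spec_post_process_html md_content out) := by unfold Spec_post_process_html; infer_instance

-- ===== CLAIM (what is proved, stated in full; the proofs are below) =====
def Claim_equal_post_process_html : Prop := ∀ (md_content : String), Dom_post_process_html md_content → Spec_post_process_html md_content (post_process_html md_content)

-- ===== LEMMAS AND PROOFS =====

-- replace(c, '') removes every occurrence of the single character c
theorem pvReplaceGo_single (c : Char) : ∀ (fuel : Nat) (l acc : List Char), l.length ≤ fuel →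
    PySem.Chars.replace.go [c] [] fuel l acc = acc.reverse ++ l.filter (· != c) := by
  intro fuel
  induction fuel with
  | zero => intro l acc h; cases l with
    | nil => simp [PySem.Chars.replace.go]
    | cons a t => simp at h
  | succ n ih => intro l acc h; cases l with
    | nil => simp [PySem.Chars.replace.go]
    | cons a t =>
      simp only [PySem.Chars.replace.go]
      by_cases hc : a = c
      · subst hc
        have hp : List.isPrefixOf [a] (a :: t) = true := by simp [List.isPrefixOf]
        simp only [hp, if_pos]
        rw [ih _ _ (by simpa using h)]
        simp
      · have hp : List.isPrefixOf [c] (a :: t) = false := by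
          simp [List.isPrefixOf]; exact fun e => absurd e.symm hc
        simp only [hp]
        rw [if_neg (by simp), ih _ _ (by simpa using h)]
        simp [hc, bne]

theorem pvReplace_single (c : Char) (l : List Char) :
    PySem.Chars.replace l [c] [] = l.filter (· != c) := by
  rw [PySem.Chars.replace]
  simp only [List.isEmpty_cons, Bool.false_eq_true, if_false]
  exact pvReplaceGo_single c l.length l [] le_rfl

-- A's four single-character replaces delete exactly the characters B's translate deletes
theorem pvClean_eq (l : List Char) : pvCleanA l = pvCleanB l := by
  unfold pvCleanA pvCleanB
  rw [pvReplace_single, pvReplace_single, pvReplace_single, pvReplace_single]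
  congr 1
  simp only [List.filter_filter]
  apply List.filter_congr
  intro c _
  simp [bne, Bool.and_comm, Bool.and_left_comm, Bool.and_assoc]

theorem pvDedup_const (l : List Char) : ∀ (acc : List Char), (∀ x ∈ l, acc.contains x) →
    l.foldl (fun acc c => if acc.contains c then acc else acc ++ [c]) acc = acc := by
  induction l with
  | nil => intro acc _; rfl
  | cons a t ih =>
    intro acc h
    simp only [List.foldl_cons, h a (by simp), if_pos]
    exact ih acc (fun x hx => h x (by simp [hx]))

theorem pvFlattenRepl (n : Nat) (c : Char) : (List.replicate n [c]).flatten = List.replicate n c := by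
  induction n with
  | zero => rfl
  | succ k ih => simp [List.replicate_succ, ih]

theorem pvDedup_replicate (n : Nat) (c : Char) (h : 0 < n) :
    pvDedupChars (List.replicate n c) = [c] := by
  obtain ⟨m, rfl⟩ : ∃ m, n = m + 1 := ⟨n - 1, by omega⟩
  unfold pvDedupChars
  rw [List.replicate_succ, List.foldl_cons]
  simp only [List.contains_nil, Bool.false_eq_true, if_false, List.nil_append]
  exact pvDedup_const _ _ (fun x hx => by simp [List.eq_of_mem_replicate hx])

theorem pvDedup_ab (a b : Char) (hab : a ≠ b) (k : Nat) (hk : 0 < k) :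
    pvDedupChars ((List.replicate k [a, b]).flatten) = [a, b] := by
  obtain ⟨m, rfl⟩ : ∃ m, k = m + 1 := ⟨k - 1, by omega⟩
  unfold pvDedupChars
  have hconst := pvDedup_const ((List.replicate m [a, b]).flatten) [a, b] (fun x hx => by
    rcases List.mem_flatten.1 hx with ⟨ys, hys, hx'⟩
    rcases List.eq_of_mem_replicate hys with rfl
    rcases hx' with h | h | h <;> simp_all)
  simp only [List.replicate_succ, List.flatten_cons, List.cons_append, List.nil_append,
    List.foldl_cons]
  simpa [Ne.symm hab] using hconst

theorem pvLenFlattenRepl (k : Nat) (xs : List Char) :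
    ((List.replicate k xs).flatten).length = k * xs.length := by
  simp [List.length_flatten, List.map_replicate, List.sum_replicate, smul_eq_mul]

theorem pvFilterA_eq (l : List Char) :
    pvFilterRepeatA l = if pvIsCharRun l then [] else l := by
  by_cases hr : pvIsCharRun l = true
  · rw [if_pos hr]
    unfold pvIsCharRun at hr
    simp only [Bool.or_eq_true, Bool.and_eq_true, decide_eq_true_eq, beq_iff_eq] at hr
    have hremove : pvDedupChars l = [l.headD ' '] ∧ l.length > 3 ∧
        (List.replicate l.length [l.headD ' ']).flatten = l ∨
        ∃ a b, a ≠ b ∧ pvDedupChars l = [a, b] ∧ l.length % 2 = 0 ∧ l.length / 2 > 3 ∧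
          (List.replicate (l.length / 2) [a, b]).flatten = l := by
      rcases hr with ⟨h3, hrep⟩ | ⟨⟨h7, he⟩, hrep⟩
      · left
        refine ⟨?_, h3, ?_⟩
        · conv_lhs => rw [hrep]
          rw [pvDedup_replicate _ _ (by omega)]
        · rw [pvFlattenRepl]; exact hrep.symm
      · have hlen2 : 2 ≤ l.length := by omega
        obtain ⟨a, t, rfl⟩ := List.exists_cons_of_ne_nil
          (show l ≠ [] by intro h; rw [h] at hlen2; simp at hlen2)
        obtain ⟨b, rest, rfl⟩ := List.exists_cons_of_ne_nil
          (show t ≠ [] by intro h; rw [h] at hlen2; simp at hlen2)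
        have htake : (a :: b :: rest).take 2 = [a, b] := rfl
        rw [htake] at hrep
        by_cases hab : a = b
        · left
          subst hab
          have hmem : ∀ x ∈ (a :: a :: rest), x = a := by
            intro x hx
            rw [hrep] at hx
            rcases List.mem_flatten.1 hx with ⟨ys, hys, hx'⟩
            rcases List.eq_of_mem_replicate hys with rfl
            rcases hx' with h | h | h <;> simp_all
          have hl : (a :: a :: rest) = List.replicate (a :: a :: rest).length a := by
            rw [List.eq_replicate_iff]; exact ⟨rfl, hmem⟩
          have hh : (a :: a :: rest).headD ' ' = a := rfl
          rw [hh]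
          refine ⟨?_, by omega, ?_⟩
          · conv_lhs => rw [hl]
            rw [pvDedup_replicate _ _ (by simp)]
          · rw [pvFlattenRepl]; exact hl.symm
        · right
          refine ⟨a, b, hab, ?_, he, by omega, hrep.symm⟩
          conv_lhs => rw [hrep]
          exact pvDedup_ab a b hab _ (by omega)
    unfold pvFilterRepeatA
    rcases hremove with ⟨hsw, h3, hfl⟩ | ⟨a, b, hab, hsw, he, ht, hfl⟩
    · rw [hsw]
      simp only [List.length_cons, List.length_nil, Nat.zero_add, Nat.div_one]
      rw [if_neg (by omega), if_pos ⟨by omega, hfl⟩]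
    · rw [hsw]
      simp only [List.length_cons, List.length_nil, Nat.zero_add, Nat.reduceAdd]
      rw [if_neg (by omega), if_pos ⟨by omega, hfl⟩]
  · rw [if_neg hr]
    unfold pvFilterRepeatA
    by_cases hg : (pvDedupChars l).length > 2 ∨ l.length % (pvDedupChars l).length > 0
    · rw [if_pos hg]
    · rw [if_neg hg]
      rw [if_neg]
      simp only [not_or, not_lt] at hg
      rintro ⟨ht, hfl⟩
      apply hr
      unfold pvIsCharRun
      simp only [Bool.or_eq_true, Bool.and_eq_true, decide_eq_true_eq, beq_iff_eq]
      match hsw : pvDedupChars l with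
      | [] => rw [hsw] at ht; simp at ht
      | [c] =>
        rw [hsw] at ht hfl
        simp only [List.length_cons, List.length_nil, Nat.zero_add, Nat.div_one] at ht hfl
        left
        rw [pvFlattenRepl] at hfl
        refine ⟨ht, ?_⟩
        have hh : l.headD ' ' = c := by
          obtain ⟨m, hm⟩ : ∃ m, l.length = m + 1 := ⟨l.length - 1, by omega⟩
          rw [← hfl, hm]
          simp [List.replicate_succ]
        rw [hh]; exact hfl.symm
      | [a, b] =>
        rw [hsw] at ht hfl hg
        simp only [List.length_cons, List.length_nil, Nat.zero_add, Nat.reduceAdd] at ht hfl hg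
        right
        have hlen : l.length = l.length / 2 * 2 := by omega
        have hlenfl : l.length = l.length / 2 * 2 := by
          conv_lhs => rw [← hfl]
          rw [pvLenFlattenRepl]; rfl
        have htk : l.take 2 = [a, b] := by
          obtain ⟨m, hm⟩ : ∃ m, l.length / 2 = m + 1 := ⟨l.length / 2 - 1, by omega⟩
          rw [← hfl, hm, List.replicate_succ, List.flatten_cons]
          rfl
        refine ⟨⟨by omega, by omega⟩, ?_⟩
        rw [htk]; exact hfl.symm
      | a :: b :: c :: t =>
        rw [hsw] at hg
        simp at hg

-- A's per-line body, characterised: keep the raw line unless it cleans to empty,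
-- is a character run, or is already in the output
theorem pvLineA_char (acc : List (List Char)) (line : List Char) :
    pvLineA acc line =
      if (pvCleanB line).isEmpty = true ∨ pvIsCharRun line = true ∨ acc.contains line = true
      then acc else acc ++ [line] := by
  simp only [pvLineA, pvClean_eq, pvFilterA_eq]
  by_cases h1 : (pvCleanB line).isEmpty = true
  · rw [List.isEmpty_iff] at h1
    have hA : ¬ ((pvCleanB line).length > 0) := by simp [h1]
    rw [if_neg hA, if_neg (fun hc => hA hc.1), if_pos (Or.inl (by rw [h1]; rfl))]
  · have hnil : pvCleanB line ≠ [] := by simpa [List.isEmpty_iff] using h1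
    have hpos : (pvCleanB line).length > 0 := List.length_pos_iff.mpr hnil
    rw [if_pos hpos]
    have hline : line ≠ [] := by intro e; apply hnil; rw [e]; rfl
    by_cases h2 : pvIsCharRun line = true
    · rw [if_pos h2, if_neg (by simp), if_pos (Or.inr (Or.inl h2))]
    · rw [if_neg h2]
      by_cases h3 : acc.contains line = true
      · rw [if_neg (fun hc => hc.2 h3), if_pos (Or.inr (Or.inr h3))]
      · rw [if_pos ⟨List.length_pos_iff.mpr hline, h3⟩,
            if_neg (by simp [h1, h2]; simpa using h3)]

-- the two per-line loops keep identical output lists; `seen` mirrors membership in the output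
theorem pvLoop_eq : ∀ (lines : List (List Char)) (acc : List (List Char)) (seen : PySem.Set (List Char)),
    (∀ x, x ∈ seen ↔ x ∈ acc) →
    (lines.foldl pvLineB (seen, acc)).2 = lines.foldl pvLineA acc := by
  intro lines
  induction lines with
  | nil => intro acc seen h; rfl
  | cons line rest ih =>
    intro acc seen h
    rw [List.foldl_cons, List.foldl_cons, pvLineA_char]
    unfold pvLineB
    by_cases h1 : (pvCleanB line).isEmpty = true
    · rw [if_pos h1, if_pos (Or.inl h1)]
      exact ih acc seen h
    · rw [if_neg h1]
      by_cases h2 : pvIsCharRun line = true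
      · rw [if_pos h2, if_pos (Or.inr (Or.inl h2))]
        exact ih acc seen h
      · rw [if_neg h2]
        by_cases h3 : line ∈ acc
        · have hs : PySem.Set.contains seen line = true := by
            simpa [PySem.Set.contains_iff] using (h line).2 h3
          rw [if_pos hs, if_pos (Or.inr (Or.inr (by simpa using h3)))]
          exact ih acc seen h
        · have hs : ¬ PySem.Set.contains seen line = true := by
            simpa [PySem.Set.contains_iff] using fun hm => h3 ((h line).1 hm)
          rw [if_neg hs, if_neg (by simp [h1, h2]; simpa using h3)]
          exact ih (acc ++ [line]) (PySem.Set.add seen line) (fun x => by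
            rw [PySem.Set.mem_add]
            simp only [List.mem_append, List.mem_singleton, h x])

-- ===== VERDICT (by name: the statement is the Claim_ definition above) =====
theorem post_process_html_spec : Claim_equal_post_process_html := by
  intro md _
  unfold Spec_post_process_html post_process_html post_process_html_alt
  simp only
  rw [pvLoop_eq _ _ _ (by intro x; simp [PySem.Set.ofList])]
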